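-- pv_equiv track=rewrite | github.com/MontrealCorpusTools/PolyglotDB | polyglotdb/syllabification/maxonset.py | split_ons_coda_maxonset
-- ===== SOURCE A (Python) =====
-- def split_ons_coda_maxonset(string, onsets):
--     """
--     Finds the split between onset and coda in a string
--
--     Parameters
--     ----------
--     string : iterable
--         the phones to search through
--     onsets : iterable
--         an iterable of possible onsets
--
--     Returns
--     -------
--     int
--         the index in the string where the onset ends and coda begins
--     """
--     if len(string) == 0:
--         return None
--     for i in range(len(string) + 1):
--         cod = tuple(string[:i])
--         ons = tuple(string[i:])
--         if ons not in onsets: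
--             continue
--         return i
--     return None
-- ===== SOURCE B (Python) =====
-- def split_ons_coda_maxonset(string, onsets):
--     """
--     Finds the split between onset and coda in a string
--
--     One pass over onsets: track the length of the longest onset that is a
--     suffix of the string; the split index is len(string) minus that length.
--     """
--     if len(string) == 0:
--         return None
--     n = len(string)
--     best = -1
--     for o in onsets:
--         k = len(o)
--         if best < k <= n and tuple(string[n - k:]) == o:
--             best = k
--     return n - best if best >= 0 else None
-- ===== Notes on version B (the rewrite author's own statement) =====
-- stated objective: faster
-- what changed: A scans every split index i, building two slices and doing a set-membership test per i; B makes a single pass over the onsets, tracking the length of the longest onset that is a suffix of the string, and returns len(string) minus that length.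
import Mathlib
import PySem

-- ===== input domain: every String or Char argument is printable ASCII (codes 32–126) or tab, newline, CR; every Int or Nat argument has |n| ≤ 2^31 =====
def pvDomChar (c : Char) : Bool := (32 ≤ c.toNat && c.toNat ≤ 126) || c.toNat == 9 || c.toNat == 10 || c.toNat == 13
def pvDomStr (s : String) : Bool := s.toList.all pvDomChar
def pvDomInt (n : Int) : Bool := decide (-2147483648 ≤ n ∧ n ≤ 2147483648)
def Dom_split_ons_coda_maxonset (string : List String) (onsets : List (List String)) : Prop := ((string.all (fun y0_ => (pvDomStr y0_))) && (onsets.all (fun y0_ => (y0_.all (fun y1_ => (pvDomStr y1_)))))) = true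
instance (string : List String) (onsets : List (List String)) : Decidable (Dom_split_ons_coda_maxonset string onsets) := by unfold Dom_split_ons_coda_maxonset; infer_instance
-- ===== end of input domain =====

-- B replaces A's scan over all split points (each building two slices and doing a membership
-- test) by a single pass over the onsets, keeping the length of the longest onset that is a
-- suffix of the string (objective: faster, one pass over onsets instead of one per split point).

-- ===== PORT A =====
-- the `for i in range(len(string)+1)` loop: first i whose suffix is in onsets, else None
def pvALoop (string : List String) (onsets : List (List String)) : List Int → Option Int
  | [] => none
  | i :: rest =>
    let _cod := PySem.List.slice string none (some i)
    let ons := PySem.List.slice string (some i) none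
    if ons ∈ onsets then some i else pvALoop string onsets rest

def split_ons_coda_maxonset (string : List String) (onsets : List (List String)) : Option Int :=
  if string.length = 0 then none
  else pvALoop string onsets (PySem.List.pyRange 0 ((string.length : Int) + 1) 1)

-- ===== PORT B =====
-- body of B's `for o in onsets` loop: keep the length of the longest matching suffix so far
def pvBStep (string : List String) (n : Int) (best : Int) (o : List String) : Int :=
  let k : Int := o.length
  if best < k ∧ k ≤ n ∧ PySem.List.slice string (some (n - k)) none = o then k else best

def split_ons_coda_maxonset_alt (string : List String) (onsets : List (List String)) : Option Int :=
  if string.length = 0 then none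
  else
    let n : Int := (string.length : Int)
    let best := onsets.foldl (pvBStep string n) (-1)
    if 0 ≤ best then some (n - best) else none

-- ===== PRECONDITION & SPEC =====
def Spec_split_ons_coda_maxonset (string : List String) (onsets : List (List String)) (out : Option Int) : Prop := out = split_ons_coda_maxonset_alt string onsets
instance (string : List String) (onsets : List (List String)) (out : Option Int) : Decidable (Spec_split_ons_coda_maxonset string onsets out) := by unfold Spec_split_ons_coda_maxonset; infer_instance

-- ===== CLAIM (what is proved, stated in full; the proofs are below) =====
def Claim_equal_split_ons_coda_maxonset : Prop := ∀ (string : List String) (onsets : List (List String)), Dom_split_ons_coda_maxonset string onsets → Spec_split_ons_coda_maxonset string onsets (split_ons_coda_maxonset string onsets)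

-- ===== LEMMAS AND PROOFS =====

-- `o` is counted by B's loop body: it fits and equals the suffix of its length
def pvGood (s o : List String) : Prop :=
  (o.length : Int) ≤ (s.length : Int) ∧
    PySem.List.slice s (some ((s.length : Int) - (o.length : Int))) none = o

theorem pvGood_slice (s : List String) (i : Int) (h0 : 0 ≤ i) (hn : i ≤ (s.length : Int)) :
    pvGood s (PySem.List.slice s (some i) none) ∧
      ((PySem.List.slice s (some i) none).length : Int) = (s.length : Int) - i := by
  rw [PySem.List.slice_from s h0]
  have hlen : ((s.drop i.toNat).length : Int) = (s.length : Int) - i := by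
    simp [List.length_drop]
    omega
  refine ⟨⟨by omega, ?_⟩, hlen⟩
  rw [hlen]
  have : (s.length : Int) - ((s.length : Int) - i) = i := by omega
  rw [this, PySem.List.slice_from s h0]

theorem pvFold_inv (s : List String) (l : List (List String)) (a : Int)
    (ha : -1 ≤ a) (han : a ≤ (s.length : Int)) :
    (a ≤ l.foldl (pvBStep s (s.length : Int)) a ∧
      l.foldl (pvBStep s (s.length : Int)) a ≤ (s.length : Int)) ∧
    (∀ o ∈ l, pvGood s o → (o.length : Int) ≤ l.foldl (pvBStep s (s.length : Int)) a) ∧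
    (l.foldl (pvBStep s (s.length : Int)) a = a ∨
      ∃ o ∈ l, pvGood s o ∧ l.foldl (pvBStep s (s.length : Int)) a = (o.length : Int)) := by
  induction l generalizing a with
  | nil => exact ⟨⟨le_refl _, han⟩, by simp, Or.inl rfl⟩
  | cons o l ih =>
    simp only [List.foldl_cons]
    by_cases hc : a < (o.length : Int) ∧ (o.length : Int) ≤ (s.length : Int) ∧
        PySem.List.slice s (some ((s.length : Int) - (o.length : Int))) none = o
    · have hstep : pvBStep s (s.length : Int) a o = (o.length : Int) := by
        simp [pvBStep, hc]
      rw [hstep]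
      obtain ⟨⟨h1, h2⟩, h3, h4⟩ := ih (o.length : Int) (by omega) hc.2.1
      refine ⟨⟨by omega, h2⟩, ?_, ?_⟩
      · intro o' ho' hg
        rcases List.mem_cons.mp ho' with h | h
        · subst h; exact h1
        · exact h3 o' h hg
      · rcases h4 with h | ⟨o', ho', hg, he⟩
        · exact Or.inr ⟨o, List.mem_cons_self, ⟨hc.2.1, hc.2.2⟩, h⟩
        · exact Or.inr ⟨o', List.mem_cons_of_mem _ ho', hg, he⟩
    · have hstep : pvBStep s (s.length : Int) a o = a := by
        simp only [pvBStep]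
        rw [if_neg hc]
      rw [hstep]
      obtain ⟨⟨h1, h2⟩, h3, h4⟩ := ih a ha han
      refine ⟨⟨h1, h2⟩, ?_, ?_⟩
      · intro o' ho' hg
        rcases List.mem_cons.mp ho' with h | h
        · subst h
          -- ¬(a < k ∧ good) and good, hence k ≤ a ≤ result
          have : ¬ a < (o'.length : Int) := by
            intro hlt; exact hc ⟨hlt, hg.1, hg.2⟩
          omega
        · exact h3 o' h hg
      · rcases h4 with h | h
        · exact Or.inl h
        · obtain ⟨o', ho', hg, he⟩ := h
          exact Or.inr ⟨o', List.mem_cons_of_mem _ ho', hg, he⟩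

theorem pvALoop_none (s : List String) (onsets : List (List String)) (l : List Int)
    (h : ∀ i ∈ l, PySem.List.slice s (some i) none ∉ onsets) :
    pvALoop s onsets l = none := by
  induction l with
  | nil => rfl
  | cons i rest ih =>
    simp only [pvALoop]
    rw [if_neg (h i List.mem_cons_self)]
    exact ih (fun j hj => h j (List.mem_cons_of_mem _ hj))

theorem pvALoop_some (s : List String) (onsets : List (List String)) (a b j : Int)
    (haj : a ≤ j) (hjb : j < b)
    (hj : PySem.List.slice s (some j) none ∈ onsets)
    (hmin : ∀ i, a ≤ i → i < j → PySem.List.slice s (some i) none ∉ onsets) :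
    pvALoop s onsets (PySem.List.pyRange a b 1) = some j := by
  have hab : a < b := by omega
  rw [PySem.List.pyRange_one_cons hab]
  simp only [pvALoop]
  by_cases haj' : a = j
  · subst haj'
    rw [if_pos hj]
  · have hlt : a < j := by omega
    rw [if_neg (hmin a (le_refl a) hlt)]
    have : (j - (a + 1)).toNat < (j - a).toNat := by omega
    exact pvALoop_some s onsets (a + 1) b j (by omega) hjb hj
      (fun i hi hij => hmin i (by omega) hij)
termination_by (j - a).toNat
decreasing_by omega

-- ===== VERDICT (by name: the statement is the Claim_ definition above) =====
theorem split_ons_coda_maxonset_spec : Claim_equal_split_ons_coda_maxonset := by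
  intro s onsets _
  unfold Spec_split_ons_coda_maxonset split_ons_coda_maxonset split_ons_coda_maxonset_alt
  by_cases hlen : s.length = 0
  · rw [if_pos hlen, if_pos hlen]
  · rw [if_neg hlen, if_neg hlen]
    simp only
    set n : Int := (s.length : Int) with hn
    set M := onsets.foldl (pvBStep s n) (-1) with hM
    obtain ⟨⟨hM1, hM2⟩, hbound, hform⟩ :=
      pvFold_inv s onsets (-1) (le_refl _) (by omega)
    rcases hform with h0 | ⟨o, ho, hg, he⟩
    · -- no onset matches: both sides are none
      have hMneg : M = -1 := h0
      rw [if_neg (by omega : ¬ (0 : Int) ≤ M)]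
      apply pvALoop_none
      intro i hi hmem
      have hi' := (PySem.List.mem_pyRange_one).mp hi
      have hgood := pvGood_slice s i hi'.1 (by omega)
      have := hbound _ hmem hgood.1
      omega
    · -- the longest matching onset o gives both sides the index n - |o|
      have hMo : M = (o.length : Int) := he
      have hM0 : 0 ≤ M := by omega
      rw [if_pos hM0]
      apply pvALoop_some s onsets 0 (n + 1) (n - M) (by omega) (by omega)
      · have : PySem.List.slice s (some (n - M)) none = o := by
          rw [hMo]; exact hg.2
        rw [this]; exact ho
      · intro i h0i hiM hmem
        have hgood := pvGood_slice s i h0i (by omega)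
        have := hbound _ hmem hgood.1
        omega
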